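-- pv_equiv track=rewrite | github.com/diqksrk/AlgorithmPrac | programmers/programmers_scouvile.py | solution
-- ===== SOURCE A (Python) =====
-- import heapq as pq
--
-- def solution(scoville, K):
--     numberOfAttempts = 0
--     pq.heapify(scoville)
--
--     while True:
--         lowestFoodScovile = pq.heappop(scoville)
--
--         if lowestFoodScovile >= K:
--             break
--
--         if (len(scoville) == 0):
--             return -1
--
--         numberOfAttempts += 1
--         pq.heappush(scoville, lowestFoodScovile + pq.heappop(scoville) * 2)
--
--     return numberOfAttempts
-- ===== SOURCE B (Python) =====
-- def solution(scoville, K):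
--     pool = sorted(scoville)
--     mixes = 0
--     while True:
--         lowest = pool.pop(0)          # IndexError on empty, like heappop
--         if lowest >= K:
--             return mixes
--         if not pool:
--             return -1
--         mixed = lowest + pool.pop(0) * 2
--         i = 0
--         while i < len(pool) and pool[i] < mixed:
--             i += 1
--         pool.insert(i, mixed)
--         mixes += 1
-- ===== Notes on version B (the rewrite author's own statement) =====
-- stated objective: alternative
-- what changed: Replaces the binary heap with a list sorted once up front, consumed from the front and kept ordered by a linear scan-and-insert of each mix result, with the while-True/break loop replaced by direct returns.
import Mathlib
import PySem

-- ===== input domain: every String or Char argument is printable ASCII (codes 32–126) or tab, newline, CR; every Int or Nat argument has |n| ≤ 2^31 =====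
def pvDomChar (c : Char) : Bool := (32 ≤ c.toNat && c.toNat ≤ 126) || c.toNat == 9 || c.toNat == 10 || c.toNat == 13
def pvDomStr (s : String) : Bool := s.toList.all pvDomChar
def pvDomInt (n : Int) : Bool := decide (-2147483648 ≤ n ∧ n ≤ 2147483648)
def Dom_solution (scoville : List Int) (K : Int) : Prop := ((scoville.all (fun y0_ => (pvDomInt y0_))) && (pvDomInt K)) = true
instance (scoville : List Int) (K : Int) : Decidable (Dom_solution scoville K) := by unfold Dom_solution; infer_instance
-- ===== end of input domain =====

-- B replaces A's binary heap by a once-sorted list consumed from the front with ordered re-insertion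
-- (alternative data structure, same results); A mutates `scoville` in place (heapify) while B does not —
-- the equivalence proved here is about the return value only.


-- ===== PORT A =====
-- heapq is modelled by its contract on int heaps: heappop returns the minimum element and leaves the
-- rest (value-exact: ties are equal ints, so the returned int is the same), heappush adds the element.
-- The loop is A's: pop lowest; if >= K break with the count; if heap empty return -1; push lowest + pop()*2.
def loopA (K : Int) (h : List Int) (count : Int) : Int :=
  match hm : PySem.List.min? h (fun x => x) with
  | none => 0      -- heappop on an empty heap: IndexError in Python (excluded by Pre_solution)
  | some m =>
    match hr : PySem.List.remove? h m with
    | none => 0    -- unreachable: the popped minimum is in the heap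
    | some rest =>
      if K ≤ m then count
      else if rest.isEmpty then -1
      else
        match hm2 : PySem.List.min? rest (fun x => x) with
        | none => 0  -- unreachable: rest is nonempty here
        | some m2 =>
          match hr2 : PySem.List.remove? rest m2 with
          | none => 0  -- unreachable
          | some rest2 => loopA K (rest2 ++ [m + m2 * 2]) (count + 1)
termination_by h.length
decreasing_by
  have h1 : m ∈ h := PySem.List.min?_mem hm
  have h2 : m2 ∈ rest := PySem.List.min?_mem hm2
  have e1 : rest = h.erase m := by
    have := PySem.List.remove?_eq_some_erase h m h1
    rw [this] at hr; exact (Option.some.inj hr).symm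
  have e2 : rest2 = rest.erase m2 := by
    have := PySem.List.remove?_eq_some_erase rest m2 h2
    rw [this] at hr2; exact (Option.some.inj hr2).symm
  have l1 : rest.length + 1 = h.length := by
    rw [e1, List.length_erase_of_mem h1]
    exact Nat.succ_pred_eq_of_pos (List.length_pos_of_mem h1)
  have l2 : rest2.length + 1 = rest.length := by
    rw [e2, List.length_erase_of_mem h2]
    exact Nat.succ_pred_eq_of_pos (List.length_pos_of_mem h2)
  simp only [List.length_append, List.length_cons, List.length_nil]
  omega

def solution (scoville : List Int) (K : Int) : Int :=
  loopA K scoville 0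

-- ===== PORT B =====
-- Source B's inner scan `while i < len(pool) and pool[i] < mixed: i += 1`
def findInsIdx (mixed : Int) : List Int → Nat
  | [] => 0
  | y :: ys => if y < mixed then findInsIdx mixed ys + 1 else 0

def loopB (K : Int) (pool : List Int) (mixes : Int) : Int :=
  match pool with
  | [] => 0        -- pool.pop(0) on an empty list: IndexError in Python (excluded by Pre_solution)
  | lowest :: pool1 =>
    if K ≤ lowest then mixes
    else
      match pool1 with
      | [] => -1
      | b :: pool2 =>
        let mixed := lowest + b * 2
        loopB K (PySem.List.insert pool2 ((findInsIdx mixed pool2 : Nat) : Int) mixed) (mixes + 1)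
termination_by pool.length
decreasing_by
  simp [PySem.List.length_insert]

def solution_alt (scoville : List Int) (K : Int) : Int :=
  loopB K (PySem.List.sorted scoville (fun x => x)) 0

-- ===== PRECONDITION & SPEC =====
-- Pre_ excludes only the empty list, on which A's first heappop raises IndexError.
def Pre_solution (scoville : List Int) (K : Int) : Prop := scoville ≠ []
instance (scoville : List Int) (K : Int) : Decidable (Pre_solution scoville K) := by unfold Pre_solution; infer_instance
def pvWitness_solution : List Int × Int := ([1, 2, 3, 9, 10, 12], 7)

def Spec_solution (scoville : List Int) (K : Int) (out : Int) : Prop := out = solution_alt scoville K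
instance (scoville : List Int) (K : Int) (out : Int) : Decidable (Spec_solution scoville K out) := by unfold Spec_solution; infer_instance

-- ===== CLAIM (what is proved, stated in full; the proofs are below) =====
def Claim_equal_solution : Prop := ∀ (scoville : List Int) (K : Int), Dom_solution scoville K → Pre_solution scoville K → Spec_solution scoville K (solution scoville K)

-- ===== LEMMAS AND PROOFS =====

-- B's scan-and-insert is Mathlib's orderedInsert
lemma findInsIdx_le_length (s : Int) (t : List Int) : findInsIdx s t ≤ t.length := by
  induction t with
  | nil => simp [findInsIdx]
  | cons y ys ih => simp only [findInsIdx, List.length_cons]; split <;> omega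

lemma insert_findInsIdx (s : Int) (t : List Int) :
    PySem.List.insert t ((findInsIdx s t : Nat) : Int) s = List.orderedInsert (· ≤ ·) s t := by
  induction t with
  | nil => simp [findInsIdx, PySem.List.insert_zero, List.orderedInsert]
  | cons y ys ih =>
    by_cases hy : y < s
    · have hle : findInsIdx s ys ≤ ys.length := findInsIdx_le_length s ys
      simp only [findInsIdx, hy, if_pos]
      rw [PySem.List.insert_natCast _ _ _ (by simpa using Nat.succ_le_succ hle)]
      rw [PySem.List.insert_natCast _ _ _ hle] at ih
      simp only [List.orderedInsert, if_neg (not_le.mpr hy)]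
      simp only [List.take_succ_cons, List.drop_succ_cons, List.cons_append, ih]
    · simp only [findInsIdx, hy, if_false, Nat.cast_zero, PySem.List.insert_zero]
      simp [List.orderedInsert, le_of_not_gt hy]

-- the popped value of a heap h that is a permutation of the sorted list m :: t is m
lemma min?_eq_head (h : List Int) (m : Int) (t : List Int)
    (hp : h.Perm (m :: t)) (hs : List.Pairwise (· ≤ ·) (m :: t)) :
    PySem.List.min? h (fun x => x) = some m := by
  cases e : PySem.List.min? h (fun x => x) with
  | none =>
    rw [PySem.List.min?_eq_none_iff] at e
    subst e
    exact absurd hp.symm (by simp)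
  | some m' =>
    have hmem : m' ∈ m :: t := hp.subset (PySem.List.min?_mem e)
    have h1 : m' ≤ m := PySem.List.min?_isMin e m (hp.symm.subset (List.mem_cons_self))
    have h2 : m ≤ m' := by
      rcases List.mem_cons.mp hmem with h' | h'
      · exact le_of_eq h'.symm
      · exact (List.pairwise_cons.mp hs).1 m' h'
    rw [le_antisymm h1 h2]

lemma loopA_eq_loopB (K : Int) :
    ∀ n (h l : List Int), h.length = n → h.Perm l → List.Pairwise (· ≤ ·) l →
      ∀ count, loopA K h count = loopB K l count := by
  intro n
  induction n using Nat.strong_induction_on with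
  | _ n ih =>
    intro h l hlen hp hs count
    match l with
    | [] =>
      have hh : h = [] := hp.eq_nil
      subst hh
      rw [loopA.eq_def, loopB.eq_def]
      rw [show PySem.List.min? ([] : List Int) (fun x => x) = none from
        (PySem.List.min?_eq_none_iff _ _).mpr rfl]
    | m :: t =>
      have hmin : PySem.List.min? h (fun x => x) = some m := min?_eq_head h m t hp hs
      have hmem : m ∈ h := PySem.List.min?_mem hmin
      have herase : PySem.List.remove? h m = some (h.erase m) :=
        PySem.List.remove?_eq_some_erase h m hmem
      have hrest : (h.erase m).Perm t := by
        have := hp.erase m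
        rwa [List.erase_cons_head] at this
      rw [loopA.eq_def, loopB.eq_def]
      split
      · next heq => rw [hmin] at heq; exact absurd heq (by simp)
      · next m' heq =>
        rw [hmin] at heq
        injection heq with hm'
        subst hm'
        split
        · next heq2 => rw [herase] at heq2; exact absurd heq2 (by simp)
        · next rest heq2 =>
          rw [herase] at heq2
          injection heq2 with hrq
          subst hrq
          by_cases hK : K ≤ m
          · simp [hK]
          · simp only [hK, if_false]
            match t, hrest, hs with
            | [], hrest, hs =>
              have he : h.erase m = [] := hrest.eq_nil
              simp [he]
            | m2 :: t2, hrest, hs =>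
              have hne : (h.erase m).isEmpty = false := by
                cases hcase : h.erase m with
                | nil => exact absurd (hcase ▸ hrest).symm (by simp)
                | cons a b => simp
              have hs' : List.Pairwise (· ≤ ·) (m2 :: t2) := (List.pairwise_cons.mp hs).2
              have hmin2 : PySem.List.min? (h.erase m) (fun x => x) = some m2 :=
                min?_eq_head _ m2 t2 hrest hs'
              have hmem2 : m2 ∈ h.erase m := PySem.List.min?_mem hmin2
              have herase2 : PySem.List.remove? (h.erase m) m2 = some ((h.erase m).erase m2) :=
                PySem.List.remove?_eq_some_erase _ m2 hmem2
              have hrest2 : ((h.erase m).erase m2).Perm t2 := by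
                have := hrest.erase m2
                rwa [List.erase_cons_head] at this
              simp only [hne, Bool.false_eq_true, if_false]
              split
              · next heq3 => rw [hmin2] at heq3; exact absurd heq3 (by simp)
              · next m2' heq3 =>
                rw [hmin2] at heq3
                injection heq3 with hm2'
                subst hm2'
                split
                · next heq4 => rw [herase2] at heq4; exact absurd heq4 (by simp)
                · next rest2 heq4 =>
                  rw [herase2] at heq4
                  injection heq4 with hr2
                  subst hr2
                  rw [insert_findInsIdx]
                  have l1 : (h.erase m).length + 1 = h.length := by
                    rw [List.length_erase_of_mem hmem]
                    exact Nat.succ_pred_eq_of_pos (List.length_pos_of_mem hmem)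
                  have l2 : ((h.erase m).erase m2).length + 1 = (h.erase m).length := by
                    rw [List.length_erase_of_mem hmem2]
                    exact Nat.succ_pred_eq_of_pos (List.length_pos_of_mem hmem2)
                  have hperm' : ((h.erase m).erase m2 ++ [m + m2 * 2]).Perm
                      (List.orderedInsert (· ≤ ·) (m + m2 * 2) t2) := by
                    refine (List.perm_append_singleton _ _).trans ?_
                    exact (hrest2.cons _).trans (List.perm_orderedInsert _ _ _).symm
                  exact ih (((h.erase m).erase m2) ++ [m + m2 * 2]).length
                    (by simp only [List.length_append, List.length_cons, List.length_nil]; omega)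
                    _ _ rfl hperm'
                    (List.Pairwise.orderedInsert _ _ (List.pairwise_cons.mp hs').2) (count + 1)

-- ===== VERDICT (by name: the statement is the Claim_ definition above) =====
theorem solution_spec : Claim_equal_solution := by
  intro scoville K _ _
  unfold Spec_solution solution solution_alt
  exact loopA_eq_loopB K scoville.length scoville _ rfl
    (PySem.List.sorted_perm scoville (fun x => x) false).symm
    (by simpa [List.Sorted] using PySem.List.sorted_pairwise scoville (fun x => x)) 0
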